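-- pv_equiv track=rewrite | github.com/HamedTaherkhani/VALTEST | dual/evaluation.py | _turn_solution_scores_into_choose_count
-- ===== SOURCE A (Python) =====
-- def _turn_solution_scores_into_choose_count(sorted_solution_scores, topk):
--     # sorted_solution_scores: list of (solution, score)
--     # if wrapped, sorted_solution_scores is list of ([solutions], score)
--     # return list of (solution, choose_count)
--     wrapped = True if type(sorted_solution_scores[0][0]) == list else False
--     result = []
--     if wrapped:
--         last_score = sorted_solution_scores[0][1]
--         merged_solutions_and_score = [sorted_solution_scores[0]]
--         for solutions, score in sorted_solution_scores[1:]: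
--             if score == last_score:
--                 last_solutions = merged_solutions_and_score[-1][0]
--                 merged_solutions_and_score[-1] = (last_solutions + solutions, score)
--             else:
--                 merged_solutions_and_score.append((solutions, score))
--                 last_score = score
--         for solutions_and_score in merged_solutions_and_score:
--             result.append((solutions_and_score[0], 1))  # choose one from solutions_and_score
--     else:
--         topk_scores = sorted(list(set([i[1] for i in sorted_solution_scores])), reverse=True)
--         for score in topk_scores:
--             solutions = [s[0] for s in sorted_solution_scores if s[1] == score]
--             result.append((solutions, 1))
--
--     if len(result) >= topk:
--         return result[:topk]
--     else:
--         intial_choose_count = [1]*len(result)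
--         for i in range(topk-len(result)):
--             intial_choose_count[i%len(result)] += 1
--         for i, choose_count in enumerate(intial_choose_count):
--             result[i] = (result[i][0], choose_count)
--         return result
-- ===== SOURCE B (Python) =====
-- def _turn_solution_scores_into_choose_count(sorted_solution_scores, topk):
--     # B: one-pass dict grouping (no per-score rescans) + closed-form choose counts
--     first = sorted_solution_scores[0]
--     if type(first[0]) == list:
--         groups = []
--         for solutions, score in sorted_solution_scores:
--             if groups and groups[-1][1] == score:
--                 groups[-1] = (groups[-1][0] + solutions, score)
--             else:
--                 groups.append((solutions, score))
--         result = [(g[0], 1) for g in groups]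
--     else:
--         by_score = {}
--         for sol, score in sorted_solution_scores:
--             by_score.setdefault(score, []).append(sol)
--         result = [(by_score[s], 1) for s in sorted(by_score, reverse=True)]
--     n = len(result)
--     if n >= topk:
--         return result[:topk]
--     q, r = divmod(topk, n)
--     return [(sols, q + (1 if i < r else 0)) for i, (sols, _) in enumerate(result)]
-- ===== Notes on version B (the rewrite author's own statement) =====
-- stated objective: faster
-- what changed: The per-distinct-score rescan of the whole input is replaced by a single-pass dict grouping (score -> solutions), and the round-robin increment loop distributing topk over the groups is replaced by the closed-form count topk//n + (1 if i < topk%n else 0) per index.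
-- outside the precondition, e.g. on _turn_solution_scores_into_choose_count([], 3): A raises IndexError, B raises IndexError
import Mathlib
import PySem

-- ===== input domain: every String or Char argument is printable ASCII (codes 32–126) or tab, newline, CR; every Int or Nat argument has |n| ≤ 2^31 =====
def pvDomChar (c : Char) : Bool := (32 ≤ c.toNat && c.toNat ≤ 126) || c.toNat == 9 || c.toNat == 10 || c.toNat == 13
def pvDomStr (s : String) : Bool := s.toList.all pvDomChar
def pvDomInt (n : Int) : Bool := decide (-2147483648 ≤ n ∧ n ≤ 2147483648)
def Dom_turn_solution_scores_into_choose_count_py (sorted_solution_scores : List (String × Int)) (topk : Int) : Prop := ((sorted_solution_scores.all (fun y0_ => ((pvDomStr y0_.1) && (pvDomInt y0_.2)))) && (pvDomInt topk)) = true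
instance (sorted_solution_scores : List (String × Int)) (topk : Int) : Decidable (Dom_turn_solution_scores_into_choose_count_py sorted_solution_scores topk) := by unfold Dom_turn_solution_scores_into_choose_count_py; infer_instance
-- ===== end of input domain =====

-- B replaces A's per-score rescans by a one-pass dict grouping and A's round-robin
-- distribution loop by a closed-form per-index count (objective: faster; measured).

-- ===== PORT A =====
-- 'wrapped = type(xs[0][0]) == list' is False for every input of this signature (solutions
-- are String), so only the 'else' grouping branch of A is reachable; xs[0] on [] raises
-- IndexError, excluded by Pre_.
def turn_solution_scores_into_choose_count_py (sorted_solution_scores : List (String × Int)) (topk : Int) : List (List String × Int) :=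
  let topk_scores := PySem.List.sorted (PySem.Set.ofList (sorted_solution_scores.map (fun i => i.2))) (fun x => x) true
  let result := topk_scores.foldl (fun res score =>
      res ++ [((sorted_solution_scores.filter (fun s => s.2 == score)).map (fun s => s.1), (1 : Int))])
      ([] : List (List String × Int))
  if (result.length : Int) ≥ topk then
    PySem.List.slice result none (some topk)
  else
    let n : Int := result.length
    let counts := (PySem.List.pyRange 0 (topk - n) 1).foldl
        (fun cnt i => PySem.List.pySetD cnt (PySem.Int.mod i n) (PySem.List.pyGetD cnt (PySem.Int.mod i n) 0 + 1))
        (List.replicate result.length (1 : Int))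
    (PySem.List.enumerate counts).foldl
        (fun res p => PySem.List.pySetD res p.1 ((PySem.List.pyGetD res p.1 ([], 0)).1, p.2)) result

-- ===== PORT B =====
-- same dead 'wrapped' branch remark: only the dict branch of Source B is reachable for String solutions
def turn_solution_scores_into_choose_count_py_alt (sorted_solution_scores : List (String × Int)) (topk : Int) : List (List String × Int) :=
  let by_score : PySem.Dict Int (List String) :=
    sorted_solution_scores.foldl (fun d p => d.modify p.2 [] (fun l => l ++ [p.1])) PySem.Dict.empty
  let result := (PySem.List.sorted by_score.keys (fun x => x) true).map
      (fun s => (by_score.getD s [], (1 : Int)))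
  let n : Int := result.length
  if n ≥ topk then
    PySem.List.slice result none (some topk)
  else
    let q := PySem.Int.floordiv topk n
    let r := PySem.Int.mod topk n
    (PySem.List.enumerate result).map (fun p => (p.2.1, q + if p.1 < r then 1 else 0))

-- ===== PRECONDITION & SPEC =====
-- Pre_ excludes only the empty list, on which A raises IndexError at sorted_solution_scores[0]
def Pre_turn_solution_scores_into_choose_count_py (sorted_solution_scores : List (String × Int)) (topk : Int) : Prop :=
  sorted_solution_scores ≠ []
instance (sorted_solution_scores : List (String × Int)) (topk : Int) : Decidable (Pre_turn_solution_scores_into_choose_count_py sorted_solution_scores topk) := by unfold Pre_turn_solution_scores_into_choose_count_py; infer_instance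
def pvWitness_turn_solution_scores_into_choose_count_py : (List (String × Int)) × Int := ([("a", 3), ("b", 1), ("c", 3)], 5)

def Spec_turn_solution_scores_into_choose_count_py (sorted_solution_scores : List (String × Int)) (topk : Int) (out : List (List String × Int)) : Prop := out = turn_solution_scores_into_choose_count_py_alt sorted_solution_scores topk
instance (sorted_solution_scores : List (String × Int)) (topk : Int) (out : List (List String × Int)) : Decidable (Spec_turn_solution_scores_into_choose_count_py sorted_solution_scores topk out) := by unfold Spec_turn_solution_scores_into_choose_count_py; infer_instance

-- ===== CLAIM (what is proved, stated in full; the proofs are below) =====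
def Claim_equal_turn_solution_scores_into_choose_count_py : Prop := ∀ (sorted_solution_scores : List (String × Int)) (topk : Int), Dom_turn_solution_scores_into_choose_count_py sorted_solution_scores topk → Pre_turn_solution_scores_into_choose_count_py sorted_solution_scores topk → Spec_turn_solution_scores_into_choose_count_py sorted_solution_scores topk (turn_solution_scores_into_choose_count_py sorted_solution_scores topk)

-- ===== LEMMAS AND PROOFS =====

theorem pv_groups_eq (xs : List (String × Int)) :
    (PySem.List.sorted (PySem.Set.ofList (xs.map (fun i => i.2))) (fun x => x) true).foldl
      (fun res score =>
        res ++ [((xs.filter (fun s => s.2 == score)).map (fun s => s.1), (1 : Int))])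
      ([] : List (List String × Int))
    = (PySem.List.sorted
        (xs.foldl (fun d p => d.modify p.2 [] (fun l => l ++ [p.1])) (PySem.Dict.empty : PySem.Dict Int (List String))).keys
        (fun x => x) true).map
      (fun s => ((xs.foldl (fun d p => d.modify p.2 [] (fun l => l ++ [p.1])) (PySem.Dict.empty : PySem.Dict Int (List String))).getD s [], (1 : Int))) := by
  have hfold : xs.foldl (fun d p => d.modify p.2 [] (fun l => l ++ [p.1])) (PySem.Dict.empty : PySem.Dict Int (List String))
      = (xs.map (fun p => (p.2, p.1))).foldl (fun d p => d.modify p.1 [] (fun l => l ++ [p.2])) PySem.Dict.empty := by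
    rw [List.foldl_map]
  have hkeys : (xs.foldl (fun d p => d.modify p.2 [] (fun l => l ++ [p.1])) (PySem.Dict.empty : PySem.Dict Int (List String))).keys
      = PySem.Set.ofList (xs.map (fun i => i.2)) := by
    rw [PySem.Dict.keys_foldl_modify_key]
    rfl
  rw [PySem.List.foldl_append_singleton_eq_map, hkeys]
  apply List.map_congr_left
  intro s hs
  rw [hfold, PySem.Dict.getD_foldl_modify_append]
  simp [List.filter_map, Function.comp_def]

theorem pv_rr_length (nn m : Nat) (c : List Int) :
    ((List.range m).foldl (fun cnt k => cnt.set (k % nn) (cnt.getD (k % nn) 0 + 1)) c).length = c.length := by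
  induction m generalizing c with
  | zero => simp
  | succ m ih =>
    rw [List.range_succ, List.foldl_append, List.foldl_cons, List.foldl_nil, List.length_set, ih]

theorem pv_succ_arith (nn m j : Nat) (h : 0 < nn) (hj : j < nn) :
    ((m + 1) / nn : Nat) + (if j < (m + 1) % nn then (1:Int) else 0)
      = (m / nn : Nat) + (if j < m % nn then (1:Int) else 0) + (if j = m % nn then (1:Int) else 0) := by
  have hr : m % nn < nn := Nat.mod_lt _ h
  have hdm := Nat.div_add_mod m nn
  rcases Nat.lt_or_ge (m % nn + 1) nn with hc | hc
  · have h1 : (m + 1) = nn * (m / nn) + (m % nn + 1) := by omega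
    rw [h1, Nat.mul_add_div h, Nat.mul_add_mod, Nat.div_eq_of_lt hc, Nat.mod_eq_of_lt hc]
    split_ifs <;> push_cast <;> omega
  · have hce : m % nn + 1 = nn := by omega
    have h1 : (m + 1) = nn * (m / nn + 1) := by rw [Nat.mul_add, Nat.mul_one]; omega
    rw [h1, Nat.mul_div_cancel_left _ h, Nat.mul_mod_right]
    split_ifs <;> push_cast <;> omega

theorem pv_rr_getD (nn m : Nat) (h : 0 < nn) (c : List Int) (hc : c.length = nn) (j : Nat) (hj : j < nn) :
    ((List.range m).foldl (fun cnt k => cnt.set (k % nn) (cnt.getD (k % nn) 0 + 1)) c).getD j 0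
      = c.getD j 0 + (m / nn : Nat) + (if j < m % nn then 1 else 0) := by
  induction m with
  | zero => simp
  | succ m ih =>
    rw [List.range_succ, List.foldl_append, List.foldl_cons, List.foldl_nil]
    have hlen : ((List.range m).foldl (fun cnt k => cnt.set (k % nn) (cnt.getD (k % nn) 0 + 1)) c).length = nn := by
      rw [pv_rr_length, hc]
    set fm := (List.range m).foldl (fun cnt k => cnt.set (k % nn) (cnt.getD (k % nn) 0 + 1)) c with hfm
    have hp : m % nn < nn := Nat.mod_lt _ h
    have hset : (fm.set (m % nn) (fm.getD (m % nn) 0 + 1)).getD j 0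
        = fm.getD j 0 + (if j = m % nn then 1 else 0) := by
      by_cases hje : j = m % nn
      · subst hje
        rw [if_pos rfl, List.getD_eq_getElem?_getD, List.getElem?_set_self (by omega)]
        simp
      · rw [if_neg hje, List.getD_eq_getElem?_getD, List.getElem?_set_ne (by omega), ← List.getD_eq_getElem?_getD]
        simp
    rw [hset]
    have ha := pv_succ_arith nn m j h hj
    split_ifs at ih ha ⊢ <;> omega

theorem pv_assign_eq (cs : List Int) (res : List (List String × Int)) (s : Nat)
    (hs : s + cs.length ≤ res.length) :
    (PySem.List.enumerate cs (s : Int)).foldl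
        (fun res p => PySem.List.pySetD res p.1 ((PySem.List.pyGetD res p.1 ([], 0)).1, p.2)) res
      = res.take s ++ ((res.drop s).zip cs).map (fun p => (p.1.1, p.2)) ++ res.drop (s + cs.length) := by
  induction cs generalizing res s with
  | nil => simp [PySem.List.enumerate]
  | cons c cs' ih =>
    simp only [List.length_cons] at hs
    have hslt : s < res.length := by omega
    rw [PySem.List.enumerate_cons, List.foldl_cons]
    have hstep : (PySem.List.pySetD res (s : Int) ((PySem.List.pyGetD res (s : Int) ([], 0)).1, c))
        = res.set s ((res[s].1, c)) := by
      rw [PySem.List.pySetD_natCast, PySem.List.pyGetD_natCast, List.getD_eq_getElem?_getD,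
        List.getElem?_eq_getElem hslt]
      rfl
    have hcast : (s : Int) + 1 = ((s + 1 : Nat) : Int) := by push_cast; ring
    rw [hstep, hcast, ih _ (s+1) (by rw [List.length_set]; omega)]
    set res1 := res.set s ((res[s].1, c)) with hres1
    have hb : ∀ k, s + 1 ≤ k → res1.drop k = res.drop k := by
      intro k hk
      apply List.ext_getElem <;> simp [hres1]
      intro i h1 h2
      rw [List.getElem_set_ne (by omega)]
    have ha : res1.take (s + 1) = res.take s ++ [(res[s].1, c)] := by
      apply List.ext_getElem
      · simp [hres1]; omega
      · intro i h1 h2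
        by_cases hi : i < s
        · rw [List.getElem_take, List.getElem_set_ne (by omega)]
          rw [List.getElem_append_left (by simp [List.length_take]; omega), List.getElem_take]
        · have hieq : i = s := by simp [hres1] at h1; omega
          subst hieq
          rw [List.getElem_take, List.getElem_set_self,
            List.getElem_append_right (by simp [List.length_take])]
          simp [List.length_take, Nat.min_eq_left (Nat.le_of_lt hslt)]
    have hc : res.drop s = res[s] :: res.drop (s + 1) := (List.getElem_cons_drop hslt).symm
    rw [ha, hc]
    simp only [List.zip_cons_cons, List.map_cons]
    rw [hb _ (by omega)]
    simp [List.append_assoc]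
    rw [hb _ (by omega), show s + 1 + cs'.length = s + (cs'.length + 1) from by omega]

theorem pv_main (xs : List (String × Int)) (topk : Int) (hpre : xs ≠ []) :
    turn_solution_scores_into_choose_count_py xs topk = turn_solution_scores_into_choose_count_py_alt xs topk := by
  unfold turn_solution_scores_into_choose_count_py turn_solution_scores_into_choose_count_py_alt
  dsimp only
  rw [pv_groups_eq]
  set R := (PySem.List.sorted
        (xs.foldl (fun d p => d.modify p.2 [] (fun l => l ++ [p.1])) (PySem.Dict.empty : PySem.Dict Int (List String))).keys
        (fun x => x) true).map
      (fun s => ((xs.foldl (fun d p => d.modify p.2 [] (fun l => l ++ [p.1])) (PySem.Dict.empty : PySem.Dict Int (List String))).getD s [], (1 : Int))) with hR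
  by_cases hcond : (R.length : Int) ≥ topk
  · rw [if_pos hcond, if_pos hcond]
  · rw [if_neg hcond, if_neg hcond]
    have hRne : R ≠ [] := by
      intro hnil
      rcases List.exists_mem_of_ne_nil xs hpre with ⟨p, hp⟩
      have hmem : p.2 ∈ PySem.Set.ofList (xs.map (fun i => i.2)) := by
        rw [PySem.Set.mem_ofList]
        exact List.mem_map_of_mem hp
      have hkeys : (xs.foldl (fun d p => d.modify p.2 [] (fun l => l ++ [p.1])) (PySem.Dict.empty : PySem.Dict Int (List String))).keys
          = PySem.Set.ofList (xs.map (fun i => i.2)) := by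
        rw [PySem.Dict.keys_foldl_modify_key]
        rfl
      rw [hR] at hnil
      rw [List.map_eq_nil_iff, PySem.List.sorted_eq_nil_iff, hkeys] at hnil
      rw [hnil] at hmem
      exact absurd hmem (List.not_mem_nil)
    have hnn : 0 < R.length := List.length_pos_iff.mpr hRne
    have htlt : (R.length : Int) < topk := by omega
    set nn := R.length with hnn'
    set m' := (topk - (nn : Int)).toNat with hm'
    have hm : topk - (nn : Int) = (m' : Int) := by omega
    have htopk : topk = ((nn + m' : Nat) : Int) := by push_cast; omega
    -- counts fold in Nat form
    have hcounts : (PySem.List.pyRange 0 (topk - (nn : Int)) 1).foldl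
        (fun cnt i => PySem.List.pySetD cnt (PySem.Int.mod i (nn : Int)) (PySem.List.pyGetD cnt (PySem.Int.mod i (nn : Int)) 0 + 1))
        (List.replicate nn (1 : Int))
        = (List.range m').foldl (fun cnt k => cnt.set (k % nn) (cnt.getD (k % nn) 0 + 1)) (List.replicate nn (1 : Int)) := by
      rw [hm, PySem.List.pyRange_one, List.foldl_map]
      congr 1
      funext cnt k
      rw [zero_add, PySem.Int.mod_natCast, PySem.List.pySetD_natCast, PySem.List.pyGetD_natCast]
    rw [hcounts]
    set C := (List.range m').foldl (fun cnt k => cnt.set (k % nn) (cnt.getD (k % nn) 0 + 1)) (List.replicate nn (1 : Int)) with hC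
    have hClen : C.length = nn := by rw [hC, pv_rr_length, List.length_replicate]
    have hassign := pv_assign_eq C R 0 (by rw [hClen, hnn']; omega)
    rw [Nat.cast_zero] at hassign
    rw [hassign]
    simp only [List.take_zero, List.drop_zero, Nat.zero_add, List.nil_append]
    rw [List.drop_of_length_le (le_of_eq (hnn'.symm.trans hClen.symm)), List.append_nil]
    -- elementwise
    apply List.ext_getElem
    · simp [hClen, PySem.List.length_enumerate]
      exact hnn'.ge
    · intro j h1 h2
      simp only [List.getElem_map, List.getElem_zip, PySem.List.getElem_enumerate]
      have hjlt : j < nn := by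
        simp only [List.length_map, List.length_zip, hClen] at h1
        omega
      have hCj : C[j]'(by omega) = C.getD j 0 := by
        rw [List.getD_eq_getElem?_getD, List.getElem?_eq_getElem (by omega)]
        rfl
      have hgd := pv_rr_getD nn m' hnn (List.replicate nn (1 : Int)) (List.length_replicate) j hjlt
      rw [← hC] at hgd
      have hrepl : (List.replicate nn (1 : Int)).getD j 0 = 1 := by
        rw [List.getD_eq_getElem?_getD, List.getElem?_eq_getElem (by simp [hjlt])]
        simp
      rw [hrepl] at hgd
      have hq : PySem.Int.floordiv topk (nn : Int) = ((m' / nn + 1 : Nat) : Int) := by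
        rw [htopk, PySem.Int.floordiv_natCast]
        norm_cast
        rw [Nat.add_comm nn m', Nat.add_div_right _ hnn]
      have hr : PySem.Int.mod topk (nn : Int) = ((m' % nn : Nat) : Int) := by
        rw [htopk, PySem.Int.mod_natCast]
        norm_cast
        rw [Nat.add_mod_left]
      simp only [hq, hr, zero_add, Prod.mk.injEq]
      refine ⟨trivial, ?_⟩
      rw [hCj, hgd]
      simp only [Nat.cast_lt, Nat.cast_add, Nat.cast_one]
      generalize (m' / nn : Nat) = A
      split_ifs <;> omega

-- ===== VERDICT (by name: the statement is the Claim_ definition above) =====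
theorem turn_solution_scores_into_choose_count_py_spec : Claim_equal_turn_solution_scores_into_choose_count_py := by
  intro sorted_solution_scores topk _hdom hpre
  unfold Spec_turn_solution_scores_into_choose_count_py
  exact pv_main sorted_solution_scores topk hpre
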